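-- pv_equiv track=rewrite | github.com/kylebgorman/perceptronix | apps/pos_tagger/model.py | _shape_features
-- ===== SOURCE A (Python) =====
-- from typing import Iterator, List, Tuple
--
-- HYPHEN = "*hyphen*"
--
-- NUMBER = "*number*"
--
-- UPPERCASE = "*uppercase*"
--
-- def _shape_features(token: str) -> Iterator[str]:
--     if len(token) > 4:  # TODO(kbg): Tune this.
--         for i in range(1, 1 + 4):
--             yield f"pre({i})={token[:i]}"
--             yield f"suf({i})={token[-i:]}"
--     if "-" in token:
--         yield HYPHEN
--     if any(ch.isdigit() for ch in token):
--         yield NUMBER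
--     if any(ch.isupper() for ch in token):
--         yield UPPERCASE
-- ===== SOURCE B (Python) =====
-- HYPHEN = "*hyphen*"
--
-- NUMBER = "*number*"
--
-- UPPERCASE = "*uppercase*"
--
-- def _shape_features(token):
--     # Returns a list (A is a generator); same elements in the same order.
--     feats = []
--     if len(token) > 4:
--         # Build the affixes incrementally, one character per step, instead of slicing.
--         pre = ""
--         suf = ""
--         for i in range(1, 5):
--             pre = pre + token[i - 1]
--             suf = token[-i] + suf
--             feats.append(f"pre({i})={pre}")
--             feats.append(f"suf({i})={suf}")
--     # One pass over the token sets all three shape flags.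
--     hyph = num = upper = False
--     for ch in token:
--         hyph = hyph or ch == "-"
--         num = num or ch.isdigit()
--         upper = upper or ch.isupper()
--     if hyph:
--         feats.append(HYPHEN)
--     if num:
--         feats.append(NUMBER)
--     if upper:
--         feats.append(UPPERCASE)
--     return feats
-- ===== Notes on version B (the rewrite author's own statement) =====
-- stated objective: alternative
-- what changed: B replaces the three separate any(...) scans over the token with a single flag-setting pass, and builds the four prefixes/suffixes incrementally one character per step instead of re-slicing the token each iteration; emission order is unchanged (B returns a list where A is a generator).
import Mathlib
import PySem

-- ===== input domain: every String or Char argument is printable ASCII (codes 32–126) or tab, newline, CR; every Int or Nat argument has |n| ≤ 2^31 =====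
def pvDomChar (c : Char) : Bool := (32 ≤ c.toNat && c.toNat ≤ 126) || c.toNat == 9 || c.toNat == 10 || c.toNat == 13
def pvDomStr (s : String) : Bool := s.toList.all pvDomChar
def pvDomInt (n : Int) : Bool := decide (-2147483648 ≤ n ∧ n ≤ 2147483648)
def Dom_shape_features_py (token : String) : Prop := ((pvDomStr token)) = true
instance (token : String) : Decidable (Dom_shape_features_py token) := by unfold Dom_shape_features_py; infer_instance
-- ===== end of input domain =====

-- B sets the three shape flags in one pass over the token instead of three any(...) scans,
-- and builds the affixes incrementally one character per step instead of slicing; same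
-- yielded sequence (B returns it as a list where A is a generator).

-- ===== PORT A =====
def shape_features_py (token : String) : List String :=
  let afx : List String :=
    if PySem.Str.len token > 4 then
      (PySem.List.pyRange 1 (1 + 4) 1).foldl (fun acc i =>
        acc ++ ["pre(" ++ PySem.Int.toStr i ++ ")=" ++ PySem.Str.slice token none (some i),
                "suf(" ++ PySem.Int.toStr i ++ ")=" ++ PySem.Str.slice token (some (-i)) none]) []
    else []
  let r1 := if PySem.Str.isIn "-" token then afx ++ ["*hyphen*"] else afx
  let r2 := if token.toList.any PySem.Chars.isdigit then r1 ++ ["*number*"] else r1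
  if token.toList.any PySem.Chars.isupper then r2 ++ ["*uppercase*"] else r2

-- ===== PORT B =====
-- pyGetD's default ' ' is never read: the len > 4 guard keeps indices 0..3 / -1..-4 in range.
def shape_features_py_alt (token : String) : List String :=
  let cs := token.toList
  let afx : List String :=
    if PySem.Str.len token > 4 then
      ((PySem.List.pyRange 1 5 1).foldl
        (fun (st : List Char × List Char × List String) i =>
          let pre := st.1 ++ [PySem.List.pyGetD cs (i - 1) ' ']
          let suf := PySem.List.pyGetD cs (-i) ' ' :: st.2.1
          (pre, suf,
            st.2.2 ++ ["pre(" ++ PySem.Int.toStr i ++ ")=" ++ String.ofList pre,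
                       "suf(" ++ PySem.Int.toStr i ++ ")=" ++ String.ofList suf]))
        (([] : List Char), ([] : List Char), ([] : List String))).2.2
    else []
  let flags := cs.foldl
    (fun (st : Bool × Bool × Bool) ch =>
      (st.1 || ch == '-', st.2.1 || PySem.Chars.isdigit ch, st.2.2 || PySem.Chars.isupper ch))
    (false, false, false)
  afx ++ (if flags.1 then ["*hyphen*"] else [])
      ++ (if flags.2.1 then ["*number*"] else [])
      ++ (if flags.2.2 then ["*uppercase*"] else [])

-- ===== PRECONDITION & SPEC =====
def Spec_shape_features_py (token : String) (out : List String) : Prop := out = shape_features_py_alt token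
instance (token : String) (out : List String) : Decidable (Spec_shape_features_py token out) := by unfold Spec_shape_features_py; infer_instance

-- ===== CLAIM (what is proved, stated in full; the proofs are below) =====
def Claim_equal_shape_features_py : Prop := ∀ (token : String), Dom_shape_features_py token → Spec_shape_features_py token (shape_features_py token)

-- ===== LEMMAS AND PROOFS =====

-- B's single flag pass computes exactly the three any-scans.
lemma flags_foldl (cs : List Char) (h n u : Bool) :
    cs.foldl (fun (st : Bool × Bool × Bool) ch =>
      (st.1 || ch == '-', st.2.1 || PySem.Chars.isdigit ch, st.2.2 || PySem.Chars.isupper ch))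
      (h, n, u)
    = (h || cs.any (· == '-'), n || cs.any PySem.Chars.isdigit, u || cs.any PySem.Chars.isupper) := by
  induction cs generalizing h n u with
  | nil => simp
  | cons c cs ih => simp [List.foldl, ih, Bool.or_assoc]

-- substring test for a single character is membership
lemma isIn_hyphen (token : String) :
    PySem.Str.isIn "-" token = token.toList.any (· == '-') := by
  have h1 : PySem.Str.isIn "-" token = true ↔ '-' ∈ token.toList := by
    rw [show PySem.Str.isIn "-" token = PySem.Chars.isIn "-".toList token.toList from by
      simp [PySem.Str.isIn]]
    rw [PySem.Chars.isIn_iff_infix]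
    show ['-'] <:+: token.toList ↔ _
    constructor
    · exact fun h => h.subset (by simp)
    · intro h; obtain ⟨l1, l2, he⟩ := List.append_of_mem h; exact ⟨l1, l2, by simp [he]⟩
  have h2 : token.toList.any (· == '-') = true ↔ '-' ∈ token.toList := by
    simp [List.any_eq_true]
  rcases hb : token.toList.any (· == '-') <;> rcases hi : PySem.Str.isIn "-" token <;>
    first | rfl | (exfalso; simp_all)

lemma drop_sub_succ (cs : List Char) (k : Nat) (h0 : 0 < k) (h : k ≤ cs.length) :
    cs.drop (cs.length - k) = cs[cs.length - k]'(by omega) :: cs.drop (cs.length - (k-1)) := by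
  rw [List.drop_eq_getElem_cons (by omega)]
  congr 2
  omega

lemma afx_eq (token : String) (h : 4 < token.toList.length) :
    (PySem.List.pyRange 1 (1 + 4) 1).foldl (fun acc i =>
        acc ++ ["pre(" ++ PySem.Int.toStr i ++ ")=" ++ PySem.Str.slice token none (some i),
                "suf(" ++ PySem.Int.toStr i ++ ")=" ++ PySem.Str.slice token (some (-i)) none]) []
    = ((PySem.List.pyRange 1 5 1).foldl
        (fun (st : List Char × List Char × List String) i =>
          let pre := st.1 ++ [PySem.List.pyGetD token.toList (i - 1) ' ']
          let suf := PySem.List.pyGetD token.toList (-i) ' ' :: st.2.1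
          (pre, suf,
            st.2.2 ++ ["pre(" ++ PySem.Int.toStr i ++ ")=" ++ String.ofList pre,
                       "suf(" ++ PySem.Int.toStr i ++ ")=" ++ String.ofList suf]))
        (([] : List Char), ([] : List Char), ([] : List String))).2.2 := by
  have hr : PySem.List.pyRange 1 (1 + 4) 1 = [1, 2, 3, 4] := by decide
  have hr5 : PySem.List.pyRange 1 5 1 = [1, 2, 3, 4] := by decide
  rw [hr, hr5]
  simp only [List.foldl, List.nil_append, List.append_assoc]
  norm_num
  have hlen : 4 < token.toList.length := h
  set cs := token.toList with hcs
  have htake : ∀ (n : Nat) (hn : n < cs.length), cs.take (n+1) = cs.take n ++ [cs[n]'hn] := by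
    intro n hn
    rw [List.take_add_one, List.getElem?_eq_getElem hn]
    rfl
  have t1 : cs.take 1 = [cs[0]'(by omega)] := by
    rw [show (1:Nat) = 0+1 from rfl, htake 0 (by omega)]
    rfl
  have t2 : cs.take 2 = [cs[0]'(by omega), cs[1]'(by omega)] := by
    rw [show (2:Nat) = 1+1 from rfl, htake 1 (by omega), t1]
    rfl
  have t3 : cs.take 3 = [cs[0]'(by omega), cs[1]'(by omega), cs[2]'(by omega)] := by
    rw [show (3:Nat) = 2+1 from rfl, htake 2 (by omega), t2]
    rfl
  have t4 : cs.take 4 = [cs[0]'(by omega), cs[1]'(by omega), cs[2]'(by omega), cs[3]'(by omega)] := by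
    rw [show (4:Nat) = 3+1 from rfl, htake 3 (by omega), t3]
    rfl
  have s1 : cs.drop (cs.length - 1) = [cs[cs.length-1]'(by omega)] := by
    rw [drop_sub_succ cs 1 (by omega) (by omega)]
    norm_num
  have s2 : cs.drop (cs.length - 2) = [cs[cs.length-2]'(by omega), cs[cs.length-1]'(by omega)] := by
    rw [drop_sub_succ cs 2 (by omega) (by omega)]
    norm_num [s1]
  have s3 : cs.drop (cs.length - 3) = [cs[cs.length-3]'(by omega), cs[cs.length-2]'(by omega), cs[cs.length-1]'(by omega)] := by
    rw [drop_sub_succ cs 3 (by omega) (by omega)]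
    norm_num [s2]
  have s4 : cs.drop (cs.length - 4) = [cs[cs.length-4]'(by omega), cs[cs.length-3]'(by omega), cs[cs.length-2]'(by omega), cs[cs.length-1]'(by omega)] := by
    rw [drop_sub_succ cs 4 (by omega) (by omega)]
    norm_num [s3]
  have gp : ∀ (n : Nat) (hn : n < cs.length), PySem.List.pyGetD cs (OfNat.ofNat n) ' ' = cs[n]'hn := by
    intro n hn
    rw [PySem.List.pyGetD_ofNat', List.getD_eq_getElem?_getD, List.getElem?_eq_getElem hn]
    rfl
  have gn : ∀ (k : Nat) (hk0 : 0 < k) (hk : k ≤ cs.length), PySem.List.pyGetD cs (-(OfNat.ofNat k)) ' ' = cs[cs.length - k]'(by omega) := by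
    intro k hk0 hk
    exact PySem.List.pyGetD_neg_ofNat cs k ' ' hk0 hk
  refine ⟨?_, ?_, ?_, ?_, ?_, ?_, ?_, ?_⟩ <;>
    simp only [PySem.Str.slice, PySem.Chars.slice_eq_listSlice] <;>
    congr 1
  · rw [PySem.List.slice_to _ (by norm_num)]
    simpa [gp 0 (by omega)] using t1
  · rw [PySem.List.slice_from_neg_one]
    simpa [gn 1 (by omega) (by omega)] using s1
  · rw [PySem.List.slice_to _ (by norm_num)]
    simpa [gp 0 (by omega), gp 1 (by omega)] using t2
  · rw [PySem.List.slice_from_neg_ofNat _ 2 (by norm_num)]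
    simpa [gn 1 (by omega) (by omega), gn 2 (by omega) (by omega)] using s2
  · rw [PySem.List.slice_to _ (by norm_num)]
    simpa [gp 0 (by omega), gp 1 (by omega), gp 2 (by omega)] using t3
  · rw [PySem.List.slice_from_neg_ofNat _ 3 (by norm_num)]
    simpa [gn 1 (by omega) (by omega), gn 2 (by omega) (by omega), gn 3 (by omega) (by omega)] using s3
  · rw [PySem.List.slice_to _ (by norm_num)]
    simpa [gp 0 (by omega), gp 1 (by omega), gp 2 (by omega), gp 3 (by omega)] using t4
  · rw [PySem.List.slice_from_neg_ofNat _ 4 (by norm_num)]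
    simpa [gn 1 (by omega) (by omega), gn 2 (by omega) (by omega), gn 3 (by omega) (by omega), gn 4 (by omega) (by omega)] using s4

theorem shape_features_py_spec : Claim_equal_shape_features_py := by
  intro token _
  unfold Spec_shape_features_py shape_features_py shape_features_py_alt
  simp only [flags_foldl, isIn_hyphen, Bool.false_or]
  by_cases hlen : PySem.Str.len token > 4
  · have h4 : 4 < token.toList.length := by
      have := hlen
      simp [PySem.Str.len_eq] at this
      exact_mod_cast this
    rw [if_pos hlen, if_pos hlen, afx_eq token h4]
    by_cases h1 : token.toList.any (· == '-') <;>
      by_cases h2 : token.toList.any PySem.Chars.isdigit <;>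
        by_cases h3 : token.toList.any PySem.Chars.isupper <;>
          simp [h1, h2, h3]
  · rw [if_neg hlen, if_neg hlen]
    by_cases h1 : token.toList.any (· == '-') <;>
      by_cases h2 : token.toList.any PySem.Chars.isdigit <;>
        by_cases h3 : token.toList.any PySem.Chars.isupper <;>
          simp [h1, h2, h3]
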